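-- pv_equiv track=rewrite | github.com/Embedded-Systems-Security-Lab/automata-learning-fuzzer | FMI/SML/inf/learning_algs/stochastic/StochasticCexProcessing.py | stochastic_longest_prefix
-- ===== SOURCE A (Python) =====
-- def stochastic_longest_prefix(cex, prefixes):
--
--     prefixes = list(prefixes)
--     prefixes.sort(key=len, reverse=True)
--
--     trimmed_cex = None
--     trimmed = False
--     for p in prefixes:
--         if p[1::2] == cex[:len(p)][1::2]:
--             trimmed_cex = cex[len(p):]
--             trimmed = True
--             break
--     trimmed_cex = trimmed_cex if trimmed else cex
--     trimmed_cex = list(trimmed_cex)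
--
--     if not trimmed_cex:
--         return ()
--
--     suffixes = [tuple(trimmed_cex[len(trimmed_cex) - i - 1:]) for i in range(0, len(trimmed_cex), 2)]
--
--     return suffixes
-- ===== SOURCE B (Python) =====
-- def stochastic_longest_prefix(cex, prefixes):
--     # single scan instead of sort: keep the best (longest, first-on-ties) matching prefix length
--     best = None
--     for p in prefixes:
--         if (best is None or len(p) > best) and p[1::2] == cex[:len(p)][1::2]:
--             best = len(p)
--
--     trimmed_cex = list(cex[best:] if best is not None else cex)
--
--     if not trimmed_cex:
--         return ()
--
--     # build the odd-length suffix tuples incrementally, back to front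
--     n = len(trimmed_cex)
--     suf = tuple(trimmed_cex[n - 1:])
--     suffixes = [suf]
--     j = n - 3
--     while j >= 0:
--         suf = tuple(trimmed_cex[j:j + 2]) + suf
--         suffixes.append(suf)
--         j -= 2
--     return suffixes
-- ===== Notes on version B (the rewrite author's own statement) =====
-- stated objective: simpler
-- what changed: Replaces the sort-then-break-at-first-match search by a single unsorted scan that keeps the strictly longest matching prefix length (strict > reproduces the stable descending sort's tie-break), and builds the odd-length suffix tuples incrementally back-to-front instead of re-slicing for each index.
import Mathlib
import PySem

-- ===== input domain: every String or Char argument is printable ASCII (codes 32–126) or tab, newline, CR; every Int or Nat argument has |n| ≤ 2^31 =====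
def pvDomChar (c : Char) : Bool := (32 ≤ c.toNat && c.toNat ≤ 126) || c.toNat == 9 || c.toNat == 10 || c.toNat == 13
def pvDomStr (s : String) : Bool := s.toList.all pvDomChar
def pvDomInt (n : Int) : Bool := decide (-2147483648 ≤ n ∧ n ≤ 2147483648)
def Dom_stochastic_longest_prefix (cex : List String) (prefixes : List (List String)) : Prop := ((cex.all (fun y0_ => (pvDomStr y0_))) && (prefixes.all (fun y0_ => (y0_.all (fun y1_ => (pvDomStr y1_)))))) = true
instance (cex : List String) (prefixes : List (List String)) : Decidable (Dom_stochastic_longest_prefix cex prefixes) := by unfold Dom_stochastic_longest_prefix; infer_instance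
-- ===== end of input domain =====

-- B replaces the sort-then-first-match search by a single best-so-far scan and builds the
-- suffix tuples incrementally back-to-front; objective: simpler (same asymptotic cost).


-- ===== PORT A =====
-- shared condition: both Pythons contain the identical expression  p[1::2] == cex[:len(p)][1::2]
def pvMatch (cex : List String) (p : List String) : Bool :=
  PySem.List.slice? p (some 1) none 2
    == PySem.List.slice? (PySem.List.slice cex none (some (p.length : Int))) (some 1) none 2

-- the for/break loop of A: first matching prefix of the sorted list, returning cex[len(p):]
def pvFindTrimA (cex : List String) : List (List String) → Option (List String)
  | [] => none
  | p :: rest =>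
    if pvMatch cex p then some (PySem.List.slice cex (some (p.length : Int)) none)
    else pvFindTrimA cex rest

def stochastic_longest_prefix (cex : List String) (prefixes : List (List String)) : List (List String) :=
  let ps := PySem.List.sorted prefixes (fun p => (p.length : Int)) true
  let trimmed_cex := (pvFindTrimA cex ps).getD cex
  if trimmed_cex = [] then []
  else
    (PySem.List.pyRange 0 (trimmed_cex.length : Int) 2).map
      (fun i => PySem.List.slice trimmed_cex (some ((trimmed_cex.length : Int) - i - 1)) none)

-- ===== PORT B =====
-- B's scan: best matching prefix length so far (strict > on the length)
def pvBestB (cex : List String) : List (List String) → Option Int → Option Int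
  | [], best => best
  | p :: rest, best =>
    pvBestB cex rest
      (if ((match best with
            | none => true
            | some b => decide (b < (p.length : Int))) && pvMatch cex p) then
        some (p.length : Int)
      else best)

-- B's while loop: prepend two elements to the current suffix, append it to the output
def pvBuildB (trimmed : List String) (j : Int) (suf : List String) (out : List (List String)) :
    List (List String) :=
  if _h : 0 ≤ j then
    let suf' := PySem.List.slice trimmed (some j) (some (j + 2)) ++ suf
    pvBuildB trimmed (j - 2) suf' (out ++ [suf'])
  else out
termination_by (j + 2).toNat
decreasing_by omega

def stochastic_longest_prefix_alt (cex : List String) (prefixes : List (List String)) : List (List String) :=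
  let best := pvBestB cex prefixes none
  let trimmed_cex :=
    match best with
    | some b => PySem.List.slice cex (some b) none
    | none => cex
  if trimmed_cex = [] then []
  else
    let n : Int := (trimmed_cex.length : Int)
    let suf := PySem.List.slice trimmed_cex (some (n - 1)) none
    pvBuildB trimmed_cex (n - 3) suf [suf]

-- ===== PRECONDITION & SPEC =====
def Spec_stochastic_longest_prefix (cex : List String) (prefixes : List (List String)) (out : List (List String)) : Prop := out = stochastic_longest_prefix_alt cex prefixes
instance (cex : List String) (prefixes : List (List String)) (out : List (List String)) : Decidable (Spec_stochastic_longest_prefix cex prefixes out) := by unfold Spec_stochastic_longest_prefix; infer_instance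

-- ===== CLAIM (what is proved, stated in full; the proofs are below) =====
def Claim_equal_stochastic_longest_prefix : Prop := ∀ (cex : List String) (prefixes : List (List String)), Dom_stochastic_longest_prefix cex prefixes → Spec_stochastic_longest_prefix cex prefixes (stochastic_longest_prefix cex prefixes)

-- ===== LEMMAS AND PROOFS =====

-- max-accumulating step: the common spec of A's sorted first match and of B's strict-> scan
def pvStep (cex : List String) (a : Option Int) (p : List String) : Option Int :=
  if pvMatch cex p then
    some (match a with
          | none => (p.length : Int)
          | some m => max m (p.length : Int))
  else a

lemma pvStep_rcomm (cex : List String) (a : Option Int) (p q : List String) :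
    pvStep cex (pvStep cex a p) q = pvStep cex (pvStep cex a q) p := by
  unfold pvStep
  rcases a with _ | m <;> split_ifs <;>
    simp_all [max_comm, max_left_comm]

lemma pvBestB_eq_foldl (cex : List String) :
    ∀ (l : List (List String)) (acc : Option Int),
      pvBestB cex l acc = l.foldl (pvStep cex) acc := by
  intro l
  induction l with
  | nil => intro acc; rfl
  | cons p rest ih =>
    intro acc
    have hstep :
        (if ((match acc with
              | none => true
              | some b => decide (b < (p.length : Int))) && pvMatch cex p) then
          some (p.length : Int)
        else acc) = pvStep cex acc p := by
      unfold pvStep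
      rcases acc with _ | m <;> split_ifs <;> simp_all
      omega
    rw [List.foldl_cons, ← hstep, ← ih]
    rfl

lemma pvFoldl_const (cex : List String) :
    ∀ (l : List (List String)) (m : Int),
      (∀ q ∈ l, ((q.length : Int)) ≤ m) →
        l.foldl (pvStep cex) (some m) = some m := by
  intro l
  induction l with
  | nil => intro m _; rfl
  | cons p rest ih =>
    intro m h
    have hp : ((p.length : Int)) ≤ m := h p (by simp)
    have : pvStep cex (some m) p = some m := by
      unfold pvStep
      split_ifs <;> simp [max_eq_left hp]
    rw [List.foldl_cons, this]
    exact ih m (fun q hq => h q (by simp [hq]))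

lemma pvFindTrimA_eq_foldl (cex : List String) :
    ∀ (s : List (List String)),
      s.Pairwise (fun a b => ((b.length : Int)) ≤ ((a.length : Int))) →
        pvFindTrimA cex s =
          (s.foldl (pvStep cex) none).map (fun b => PySem.List.slice cex (some b) none) := by
  intro s
  induction s with
  | nil => intro _; rfl
  | cons p rest ih =>
    intro hpw
    rw [List.pairwise_cons] at hpw
    by_cases hm : pvMatch cex p
    · have hstep : pvStep cex none p = some ((p.length : Int)) := by
        unfold pvStep; simp [hm]
      simp only [pvFindTrimA, hm, if_pos, List.foldl_cons, hstep]
      rw [pvFoldl_const cex rest _ (fun q hq => hpw.1 q hq)]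
      rfl
    · have hstep : pvStep cex none p = none := by
        unfold pvStep; simp [hm]
      simp only [pvFindTrimA, hm, if_neg, Bool.false_eq_true, not_false_iff,
        List.foldl_cons, hstep]
      exact ih hpw.2

-- the two trimmed counterexamples coincide
lemma pvTrim_eq (cex : List String) (prefixes : List (List String)) :
    (pvFindTrimA cex (PySem.List.sorted prefixes (fun p => (p.length : Int)) true)).getD cex =
      (match pvBestB cex prefixes none with
       | some b => PySem.List.slice cex (some b) none
       | none => cex) := by
  have hperm := PySem.List.sorted_perm prefixes (fun p => (p.length : Int)) true
  have hpw := PySem.List.sorted_pairwise_rev prefixes (fun p => (p.length : Int))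
  haveI : RightCommutative (pvStep cex) := ⟨fun a p q => pvStep_rcomm cex a p q⟩
  rw [pvFindTrimA_eq_foldl cex _ hpw, hperm.foldl_eq none, pvBestB_eq_foldl]
  cases (prefixes.foldl (pvStep cex) none) <;> rfl

-- proof-side closed form of the suffix list: drops at j, j-2, … while ≥ 0
def pvDrops (t : List String) (j : Int) : List (List String) :=
  if 0 ≤ j then PySem.List.slice t (some j) none :: pvDrops t (j - 2) else []
termination_by (j + 2).toNat
decreasing_by omega

lemma pvSliceSplit (t : List String) (j : Int) (hj : 0 ≤ j) :
    PySem.List.slice t (some j) (some (j + 2)) ++ PySem.List.slice t (some (j + 2)) none =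
      PySem.List.slice t (some j) none := by
  rw [PySem.List.slice_toNat t hj (by omega), PySem.List.slice_from t (by omega),
    PySem.List.slice_from t hj]
  have h2 : (j + 2).toNat = j.toNat + 2 := by omega
  rw [h2]
  have : (j + 2).toNat - j.toNat = 2 := by omega
  rw [h2] at this
  simp only [Nat.add_sub_cancel_left] at this ⊢
  rw [← List.drop_drop, List.take_append_drop]

lemma pvBuildB_eq_drops (t : List String) :
    ∀ (j : Int) (out : List (List String)),
      pvBuildB t j (PySem.List.slice t (some (j + 2)) none) out = out ++ pvDrops t j := by
  intro j
  induction j using pvDrops.induct with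
  | case1 j hj ih =>
    intro out
    rw [pvBuildB, dif_pos hj, pvDrops, if_pos hj]
    have hsuf : PySem.List.slice t (some j) (some (j + 2)) ++
        PySem.List.slice t (some (j + 2)) none = PySem.List.slice t (some (j - 2 + 2)) none := by
      rw [pvSliceSplit t j hj]; norm_num
    rw [hsuf, ih]
    simp
  | case2 j hj =>
    intro out
    rw [pvBuildB, dif_neg hj, pvDrops, if_neg hj]
    simp

lemma pvDrops_closed (t : List String) :
    ∀ (j : Int),
      pvDrops t j =
        (List.range ((j + 2) / 2).toNat).map
          (fun (i : Nat) => PySem.List.slice t (some (j - 2 * (i : Int))) none) := by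
  intro j
  induction j using pvDrops.induct with
  | case1 j hj ih =>
    rw [pvDrops, if_pos hj]
    have hc : ((j + 2) / 2).toNat = ((j - 2 + 2) / 2).toNat + 1 := by omega
    rw [hc, List.range_succ_eq_map, List.map_cons, List.map_map, ih]
    congr 1
    · norm_num
    · apply List.map_congr_left
      intro i _
      simp only [Function.comp_apply]
      congr 1
      push_cast
      ring_nf
  | case2 j hj =>
    rw [pvDrops, if_neg hj]
    have : ((j + 2) / 2).toNat = 0 := by omega
    simp [this]

-- A's range comprehension equals B's incremental construction, for a non-empty trimmed list
lemma pvSuffixes_eq (t : List String) (ht : t ≠ []) :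
    (PySem.List.pyRange 0 (t.length : Int) 2).map
        (fun i => PySem.List.slice t (some ((t.length : Int) - i - 1)) none) =
      pvBuildB t ((t.length : Int) - 3) (PySem.List.slice t (some ((t.length : Int) - 1)) none)
        [PySem.List.slice t (some ((t.length : Int) - 1)) none] := by
  have hn : 1 ≤ (t.length : Int) := by
    have := List.length_pos_iff.mpr ht; exact_mod_cast this
  have hB : pvBuildB t ((t.length : Int) - 3)
      (PySem.List.slice t (some ((t.length : Int) - 1)) none)
      [PySem.List.slice t (some ((t.length : Int) - 1)) none] =
      [PySem.List.slice t (some ((t.length : Int) - 1)) none] ++ pvDrops t ((t.length : Int) - 3) := by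
    have h1 : (t.length : Int) - 1 = ((t.length : Int) - 3) + 2 := by ring
    rw [h1, pvBuildB_eq_drops]
  rw [hB]
  have hD : pvDrops t ((t.length : Int) - 1) =
      PySem.List.slice t (some ((t.length : Int) - 1)) none :: pvDrops t ((t.length : Int) - 3) := by
    rw [pvDrops, if_pos (by omega)]
    have h32 : (t.length : Int) - 1 - 2 = (t.length : Int) - 3 := by ring
    rw [h32]
  rw [show ([PySem.List.slice t (some ((t.length : Int) - 1)) none] ++
      pvDrops t ((t.length : Int) - 3)) =
      pvDrops t ((t.length : Int) - 1) from by rw [hD]; rfl]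
  rw [pvDrops_closed, PySem.List.pyRange_of_pos 0 (t.length : Int) (by norm_num)]
  rw [if_pos (by omega), List.map_map]
  have hcnt : (((t.length : Int) - 1 + 2) / 2).toNat = (((t.length : Int) - 0 + 2 - 1) / 2).toNat := by
    omega
  rw [← hcnt]
  apply List.map_congr_left
  intro i _
  simp only [Function.comp_apply]
  congr 1
  ring_nf

-- ===== VERDICT (by name: the statement is the Claim_ definition above) =====
theorem stochastic_longest_prefix_spec : Claim_equal_stochastic_longest_prefix := by
  intro cex prefixes _
  unfold Spec_stochastic_longest_prefix
  simp only [stochastic_longest_prefix, stochastic_longest_prefix_alt]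
  rw [← pvTrim_eq cex prefixes]
  set t := (pvFindTrimA cex (PySem.List.sorted prefixes (fun p => (p.length : Int)) true)).getD cex with ht
  by_cases h : t = []
  · simp [h]
  · simp only [if_neg h]
    exact pvSuffixes_eq t h
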